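-- pv_equiv track=rewrite | github.com/Dibyendu1000/10-Days-Recursion-Challenge | Day-1/family-structure.py | kthChildNthGeneration
-- ===== SOURCE A (Python) =====
-- def kthChildNthGeneration(n, k):
--     # If we need the 1st child or 1st Gen child, it is always Male, given the family structure
--     if (n == 1 or k == 1):
--         return 'Male'
--
--     # To find the parent of ith child
--     parent = (k+1)//2
--
--     if (kthChildNthGeneration(n-1, parent) == 'Male'):
--         # If Parent is Male, first child is male & second child is female
--         if (k & 1):
--             return 'Male'
--         else:
--             return 'Female'
--     else:
--         # If Parent is Female, first child is female & second child is male
--         if (k & 1):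
--             return 'Female'
--         else:
--             return 'Male'
-- ===== SOURCE B (Python) =====
-- def kthChildNthGeneration(n, k):
--     # Closed form: the gender flips once for every even index on the ancestor
--     # chain, and that chain's indices-minus-one are exactly the binary digits of
--     # k-1 consumed low-to-high, truncated to n-1 levels. So the answer is the
--     # parity of the popcount of the low n-1 bits of k-1.
--     if n == 1 or k == 1:
--         return 'Male'
--     j = k - 1
--     if 1 < n <= j.bit_length():
--         j &= (1 << (n - 1)) - 1
--     return 'Male' if bin(j).count('1') % 2 == 0 else 'Female'
-- ===== Notes on version B (the rewrite author's own statement) =====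
-- stated objective: alternative
-- what changed: Replaces the per-generation recursion (one call per ancestor, comparing returned 'Male'/'Female' strings) with a closed form: the answer is the parity of the popcount of the low n-1 bits of k-1, computed directly with bit operations.
-- outside the precondition, e.g. on kthChildNthGeneration(5, 0): A returns 'Male', B returns 'Female'; on kthChildNthGeneration(-3, 0): A raises RecursionError, B returns 'Female'
import Mathlib
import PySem

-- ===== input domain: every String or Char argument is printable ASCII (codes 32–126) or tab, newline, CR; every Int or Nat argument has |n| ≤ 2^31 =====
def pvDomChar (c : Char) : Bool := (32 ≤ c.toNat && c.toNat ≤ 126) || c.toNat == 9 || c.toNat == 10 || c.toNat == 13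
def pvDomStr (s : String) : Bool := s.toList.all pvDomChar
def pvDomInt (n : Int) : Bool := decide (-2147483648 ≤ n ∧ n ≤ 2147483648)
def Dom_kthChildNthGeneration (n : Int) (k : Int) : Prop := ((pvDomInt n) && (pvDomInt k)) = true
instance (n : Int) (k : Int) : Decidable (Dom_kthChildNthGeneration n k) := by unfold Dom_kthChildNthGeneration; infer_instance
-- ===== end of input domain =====

-- B replaces A's per-generation recursion by a closed form: the gender is the
-- parity of the popcount of the low n-1 bits of k-1.

-- ===== PORT A =====
-- A's recursion is ported with a fuel counter (totality only): under Pre_ the base case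
-- n == 1 / k == 1 is reached strictly before the fuel runs out, so the fuel default is unreachable.
def kthGoA (fuel : Nat) (n k : Int) : String :=
  match fuel with
  | 0 => "Male"  -- fuel exhausted (unreachable under Pre_)
  | f + 1 =>
    if n == 1 || k == 1 then "Male"
    else
      -- parent = (k+1)//2
      let parent := PySem.Int.floordiv (k + 1) 2
      if kthGoA f (n - 1) parent == "Male" then
        -- Python `if (k & 1)` : truthy iff k is odd
        if k % 2 == 1 then "Male" else "Female"
      else
        if k % 2 == 1 then "Female" else "Male"

def kthChildNthGeneration (n : Int) (k : Int) : String :=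
  kthGoA (n.toNat + k.toNat) n k

-- ===== PORT B =====
-- Source B step for step: `j.bit_length()` → PySem.Int.bitLength, `j & ((1 << (n-1)) - 1)` →
-- PySem.Int.band / `<<<` (the shift exponent n-1 is > 0 in its branch, so `.toNat` is exact),
-- `bin(j).count('1')` → PySem.Int.bitCount (Python-exact also on negative j).
def kthChildNthGeneration_alt (n : Int) (k : Int) : String :=
  if n == 1 || k == 1 then "Male"
  else
    let j : Int := k - 1
    let j : Int :=
      if 1 < n ∧ n ≤ (PySem.Int.bitLength j : Int) then
        PySem.Int.band j (((1 : Int) <<< (n - 1).toNat) - 1)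
      else j
    if PySem.Int.bitCount j % 2 == 0 then "Male" else "Female"

-- ===== PRECONDITION & SPEC =====
-- Pre_ restricts to the natural domain of a positive child index k ≥ 1 (any n is fine there);
-- for k ≤ 0 the child index never reaches the base case, so A's recursion depth is n: A raises
-- RecursionError for n ≤ 0 or n beyond CPython's stack limit, and the value it returns for the
-- remaining small positive n is an artefact of recursing on a meaningless index (see claim cites).
def Pre_kthChildNthGeneration (n : Int) (k : Int) : Prop := 1 ≤ k
instance (n : Int) (k : Int) : Decidable (Pre_kthChildNthGeneration n k) := by
  unfold Pre_kthChildNthGeneration; infer_instance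

def pvWitness_kthChildNthGeneration : Int × Int := (3, 5)

def Spec_kthChildNthGeneration (n : Int) (k : Int) (out : String) : Prop := out = kthChildNthGeneration_alt n k
instance (n : Int) (k : Int) (out : String) : Decidable (Spec_kthChildNthGeneration n k out) := by unfold Spec_kthChildNthGeneration; infer_instance

-- ===== CLAIM (what is proved, stated in full; the proofs are below) =====
def Claim_equal_kthChildNthGeneration : Prop := ∀ (n : Int) (k : Int), Dom_kthChildNthGeneration n k → Pre_kthChildNthGeneration n k → Spec_kthChildNthGeneration n k (kthChildNthGeneration n k)

-- ===== LEMMAS AND PROOFS =====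

-- The number B's masking effectively counts the bits of: the low n-1 bits of k-1.
def effN (n k : Int) : Nat :=
  if 1 < n then (k - 1).toNat % 2 ^ (n - 1).toNat else (k - 1).toNat

-- bitCount unfolds one low bit (holds also at 0)
lemma cnt_step (x : Nat) :
    PySem.Int.bitCount (x : Int) = x % 2 + PySem.Int.bitCount ((x / 2 : Nat) : Int) := by
  rcases Nat.eq_zero_or_pos x with h | h
  · subst h; simp [PySem.Int.bitCount_zero]
  · exact PySem.Int.bitCount_natCast h

lemma shift_pow (m : Nat) : ((1 : Int) <<< m) = ((2 ^ m : Nat) : Int) := by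
  simp [Int.shiftLeft_eq]

-- B's value is the parity of bitCount (effN n k)
lemma alt_char (n k : Int) (hk : 2 ≤ k) (hn : n ≠ 1) :
    kthChildNthGeneration_alt n k =
      (if PySem.Int.bitCount ((effN n k : Nat) : Int) % 2 == 0 then "Male" else "Female") := by
  have ha : k - 1 = (((k - 1).toNat : Nat) : Int) := by omega
  -- the effectively masked j equals effN n k
  have hj : (if 1 < n ∧ n ≤ (PySem.Int.bitLength (k - 1) : Int) then
        PySem.Int.band (k - 1) (((1 : Int) <<< (n - 1).toNat) - 1)
      else (k - 1)) = ((effN n k : Nat) : Int) := by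
    by_cases hc : 1 < n ∧ n ≤ (PySem.Int.bitLength (k - 1) : Int)
    · rw [if_pos hc]
      unfold effN
      rw [if_pos hc.1]
      have hmask : ((1 : Int) <<< (n - 1).toNat) - 1 = ((2 ^ (n - 1).toNat - 1 : Nat) : Int) := by
        rw [shift_pow]
        have h2 : 1 ≤ 2 ^ (n - 1).toNat := Nat.one_le_two_pow
        push_cast [h2]; ring
      rw [ha, hmask, PySem.Int.band_natCast, Nat.and_two_pow_sub_one_eq_mod]
      simp
    · rw [if_neg hc]
      unfold effN
      by_cases h1 : 1 < n
      · -- n exceeds j.bit_length(), so the low-bits mask is a no-op: j % 2^(n-1) = j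
        have hbl : (PySem.Int.bitLength (k - 1) : Int) < n := by
          rcases lt_or_ge (PySem.Int.bitLength (k - 1) : Int) n with h | h
          · exact h
          · exact absurd ⟨h1, h⟩ hc
        have hlt : (k - 1).toNat < 2 ^ (n - 1).toNat := by
          have h2 := PySem.Int.lt_two_pow_bitLength (k - 1)
          have hnab : (k - 1).natAbs = (k - 1).toNat := by omega
          calc (k - 1).toNat = (k - 1).natAbs := hnab.symm
            _ < 2 ^ PySem.Int.bitLength (k - 1) := h2
            _ ≤ 2 ^ (n - 1).toNat := Nat.pow_le_pow_right (by norm_num) (by omega)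
        rw [if_pos h1, Nat.mod_eq_of_lt hlt]
        exact ha
      · rw [if_neg h1]
        exact ha
  simp only [kthChildNthGeneration_alt]
  rw [if_neg (by simp only [Bool.or_eq_true, beq_iff_eq]; push_neg; exact ⟨hn, by omega⟩)]
  simp only [hj]

-- the small bitCount literal used below
lemma cnt_one : PySem.Int.bitCount (1 : Int) = 1 := by decide

-- one halving step of effN matches one recursion step of A (n = 2 handled separately)
lemma eff_step (n k : Int) (hk : 2 ≤ k) (_hn1 : n ≠ 1) (hn2 : n ≠ 2) :
    PySem.Int.bitCount ((effN n k : Nat) : Int) =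
      (k - 1).toNat % 2 + PySem.Int.bitCount ((effN (n - 1) ((k + 1) / 2) : Nat) : Int) := by
  have ha' : ((k + 1) / 2 - 1).toNat = (k - 1).toNat / 2 := by omega
  unfold effN
  by_cases h1 : 1 < n
  · have hn3 : 3 ≤ n := by omega
    rw [if_pos h1, if_pos (by omega : 1 < n - 1)]
    set a := (k - 1).toNat with hadef
    have hm : (n - 1).toNat = (n - 1 - 1).toNat + 1 := by omega
    set m := (n - 1 - 1).toNat
    rw [hm, cnt_step (a % 2 ^ (m + 1))]
    have e1 : a % 2 ^ (m + 1) % 2 = a % 2 :=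
      Nat.mod_mod_of_dvd a ⟨2 ^ m, by ring⟩
    have e2 : a % 2 ^ (m + 1) / 2 = a / 2 % 2 ^ m := by
      have : (2 : Nat) ^ (m + 1) = 2 * 2 ^ m := by ring
      rw [this, Nat.mod_mul_right_div_self]
    rw [e1, e2, ha']
  · rw [if_neg h1, if_neg (by omega : ¬ 1 < n - 1), ha']
    exact cnt_step _

-- B satisfies exactly A's recurrence (flip the parent's gender iff k is even)
lemma alt_flip (n k : Int) (hk : 2 ≤ k) (hn : n ≠ 1) :
    kthChildNthGeneration_alt n k =
      (if kthChildNthGeneration_alt (n - 1) (PySem.Int.floordiv (k + 1) 2) == "Male" then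
        (if k % 2 == 1 then "Male" else "Female")
      else
        (if k % 2 == 1 then "Female" else "Male")) := by
  rw [PySem.Int.floordiv_eq_ediv_of_pos (by norm_num)]
  set k' := (k + 1) / 2 with hk'def
  have hk'1 : 1 ≤ k' := by omega
  have hkm : k % 2 = 0 ∨ k % 2 = 1 := Int.emod_two_eq k
  have hpar : (k % 2 = 1 ↔ (k - 1).toNat % 2 = 0) := by omega
  by_cases hbase : n - 1 = 1 ∨ k' = 1
  · have hMale : kthChildNthGeneration_alt (n - 1) k' = "Male" := by
      unfold kthChildNthGeneration_alt
      rcases hbase with h | h <;> simp [h]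
    rw [hMale, alt_char n k hk hn]
    by_cases hn2 : n = 2
    · -- the parent is generation 1: effN is the single low bit of k-1
      subst hn2
      have heff2 : effN 2 k = (k - 1).toNat % 2 := by
        unfold effN
        rw [if_pos (by norm_num : (1:Int) < 2)]
        norm_num
      rw [heff2]
      rcases hkm with hm | hm
      · have h1 : (k - 1).toNat % 2 = 1 := by omega
        rw [h1]; simp [cnt_one, hm]
      · have h0 : (k - 1).toNat % 2 = 0 := by omega
        rw [h0]; simp [PySem.Int.bitCount_zero, hm]
    · -- then k' = 1, so k = 2 and effN n 2 = 1
      have hk2 : k = 2 := by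
        rcases hbase with h | h
        · exact absurd (by omega : n = 2) hn2
        · omega
      subst hk2
      have heff : effN n 2 = 1 := by
        unfold effN
        by_cases h1 : 1 < n
        · have hlt : (1 : Nat) < 2 ^ (n - 1).toNat :=
            Nat.one_lt_two_pow_iff.mpr (by omega)
          have h21 : ((2:Int) - 1).toNat = 1 := by norm_num
          rw [if_pos h1, h21, Nat.mod_eq_of_lt hlt]
        · rw [if_neg h1]; rfl
      rw [heff]; simp [cnt_one]
  · push_neg at hbase
    have hk'2 : 2 ≤ k' := by omega
    rw [alt_char n k hk hn, alt_char (n - 1) k' hk'2 hbase.1,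
        eff_step n k hk hn (by rintro rfl; exact hbase.1 (by norm_num))]
    rcases Nat.mod_two_eq_zero_or_one
        (PySem.Int.bitCount ((effN (n - 1) k' : Nat) : Int)) with h2 | h2 <;>
      rcases hkm with hm | hm
    · have ha1 : (k - 1).toNat % 2 = 1 := by omega
      rw [ha1, Nat.add_mod, h2, hm]; decide
    · have ha1 : (k - 1).toNat % 2 = 0 := by omega
      rw [ha1, Nat.add_mod, h2, hm]; decide
    · have ha1 : (k - 1).toNat % 2 = 1 := by omega
      rw [ha1, Nat.add_mod, h2, hm]; decide
    · have ha1 : (k - 1).toNat % 2 = 0 := by omega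
      rw [ha1, Nat.add_mod, h2, hm]; decide

-- main induction: with fuel ≥ k, A's recursion computes B's closed form
lemma main_ind (f : Nat) : ∀ (n k : Int), 1 ≤ k → k.toNat ≤ f →
    kthGoA f n k = kthChildNthGeneration_alt n k := by
  induction f with
  | zero => intro n k h1 h2; omega
  | succ f ih =>
    intro n k h1 h2
    by_cases hbase : n = 1 ∨ k = 1
    · have hA : kthGoA (f + 1) n k = "Male" := by
        simp only [kthGoA]; rcases hbase with h | h <;> simp [h]
      have hB : kthChildNthGeneration_alt n k = "Male" := by
        unfold kthChildNthGeneration_alt; rcases hbase with h | h <;> simp [h]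
      rw [hA, hB]
    · push_neg at hbase
      have hk2 : 2 ≤ k := by omega
      have hAstep : kthGoA (f + 1) n k =
          (if kthGoA f (n - 1) (PySem.Int.floordiv (k + 1) 2) == "Male" then
            (if k % 2 == 1 then "Male" else "Female")
          else (if k % 2 == 1 then "Female" else "Male")) := by
        simp only [kthGoA]
        rw [if_neg (by simp [hbase.1, hbase.2])]
      have hfd : PySem.Int.floordiv (k + 1) 2 = (k + 1) / 2 :=
        PySem.Int.floordiv_eq_ediv_of_pos (by norm_num)
      have hrec : kthGoA f (n - 1) (PySem.Int.floordiv (k + 1) 2) =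
          kthChildNthGeneration_alt (n - 1) (PySem.Int.floordiv (k + 1) 2) := by
        apply ih
        · rw [hfd]; omega
        · rw [hfd]; omega
      rw [hAstep, hrec, ← alt_flip n k hk2 hbase.1]

-- ===== VERDICT (by name: the statement is the Claim_ definition above) =====
theorem kthChildNthGeneration_spec : Claim_equal_kthChildNthGeneration := by
  intro n k _hdom hpre
  unfold Spec_kthChildNthGeneration kthChildNthGeneration
  exact main_ind (n.toNat + k.toNat) n k hpre (by omega)
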